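-- pv_equiv track=rewrite | github.com/PRETHIV-zz/Problem_Solver | 256_Dhayalan_Reference.py | retlen
-- ===== SOURCE A (Python) =====
-- def retlen(s,i):
--     l=i+1
--     if l==len(s):
--         return 1
--     else:
--         if s[i]==s[l]:
--             return 1+retlen(s,l)
--         else:
--             return 1
-- ===== SOURCE B (Python) =====
-- def retlen(s, i):
--     c = s[i]                  # the character whose run we measure (IndexError on out-of-range i)
--     j = i % len(s)            # its normalized position
--     n = 1
--     for ch in s[j + 1:]:
--         if ch != c:
--             break
--         n += 1
--     return n
-- ===== Notes on version B (the rewrite author's own statement) =====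
-- stated objective: alternative
-- what changed: Replaced A's index-by-index tail recursion with a single normalization of the start index (i % len(s)) followed by counting the equal-char prefix of the slice s[j+1:], dropping A's negative-index wraparound.
-- intended difference: On in-range negative i whose run of equal characters reaches the end of the string while s[0] == s[-1], A wraps around (compares s[-1] with s[0]) and keeps counting from the front, returning the wrapped total; B returns the plain run length from position len(s)+i to the end, the intended value. — e.g. on retlen("aa", -1): A returns 3, B returns 1
-- outside the precondition, e.g. on retlen('', -1): A returns 1, B raises IndexError
import Mathlib
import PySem

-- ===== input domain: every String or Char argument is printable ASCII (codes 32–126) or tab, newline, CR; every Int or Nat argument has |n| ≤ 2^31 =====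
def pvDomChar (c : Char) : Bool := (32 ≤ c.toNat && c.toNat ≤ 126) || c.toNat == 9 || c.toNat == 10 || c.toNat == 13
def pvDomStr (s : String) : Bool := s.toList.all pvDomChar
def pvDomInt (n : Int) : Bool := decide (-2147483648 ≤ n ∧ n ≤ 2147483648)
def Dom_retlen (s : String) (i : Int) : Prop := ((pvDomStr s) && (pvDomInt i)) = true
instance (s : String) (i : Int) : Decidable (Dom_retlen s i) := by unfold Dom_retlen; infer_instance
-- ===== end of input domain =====

-- B normalizes the start index once with i % len(s) and counts the equal-char prefix of the
-- slice s[j+1:], instead of A's index-by-index tail recursion; objective: alternative.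
-- On negative in-range i whose run reaches the end of the string, B deliberately does NOT
-- reproduce A's negative-index wraparound (see D_retlen below).

-- termination helper for port A: a successful Python index access means i < len(s)
theorem pv_get_lt (s : String) (i : Int) (c : Char) (h : PySem.Str.pyGet? s i = some c) :
    i < PySem.Str.len s := by
  have h' : PySem.List.pyGet? s.toList i = some c := by
    simpa [PySem.Str.pyGet?_eq, PySem.Chars.pyGet?_eq_listPyGet?] using h
  have hr : PySem.Raise.InRange s.toList.length i := by
    by_contra hn
    exact Option.some_ne_none c (h'.symm.trans ((PySem.List.pyGet?_eq_none_iff _ _).mpr hn))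
  simp only [PySem.Raise.InRange, PySem.Str.len_eq] at *
  omega

-- ===== PORT A =====
-- literal port of A's recursion; the `| _, _ => 1` fallback is Python's IndexError (excluded by Pre_)
def retlen (s : String) (i : Int) : Int :=
  if i + 1 = PySem.Str.len s then 1
  else
    match h1 : PySem.Str.pyGet? s i, PySem.Str.pyGet? s (i + 1) with
    | some a, some b => if a = b then 1 + retlen s (i + 1) else 1
    | _, _ => 1
termination_by (PySem.Str.len s + 1 - i).toNat
decreasing_by
  have := pv_get_lt s i _ h1
  omega

-- ===== PORT B =====
-- the for/break counting loop of Source B, structural recursion over the sliced char list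
def pvRunCount (c : Char) : List Char → Int
  | [] => 0
  | ch :: t => if ch = c then 1 + pvRunCount c t else 0

-- Source B: c = s[i] (pyGet? none = IndexError, excluded by Pre_); j = i % len(s)
-- (mod? none = ZeroDivisionError, unreachable once s[i] succeeded);
-- then count the run through the slice s[j+1:]
def retlen_alt (s : String) (i : Int) : Int :=
  match PySem.Str.pyGet? s i with
  | none => 0
  | some c =>
    match PySem.Int.mod? i (PySem.Str.len s) with
    | none => 0
    | some j => 1 + pvRunCount c (PySem.List.slice s.toList (some (j + 1)) none)

-- ===== PRECONDITION & SPEC =====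
-- Pre_ excludes the inputs where A raises IndexError (i out of Python's index range with
-- i + 1 ≠ len(s)), and with them the single returning corner shape ("", -1), where A's
-- l == len(s) check fires before any index access so A accidentally returns 1 while B's own
-- first step s[i] raises IndexError.
def Pre_retlen (s : String) (i : Int) : Prop :=
  -(PySem.Str.len s) ≤ i ∧ i < PySem.Str.len s
instance (s : String) (i : Int) : Decidable (Pre_retlen s i) := by unfold Pre_retlen; infer_instance

def pvWitness_retlen : String × Int := ("aa", 0)

-- For in-range negative i whose run of equal characters reaches the end of the string while
-- s[0] == s[-1], A's recursion wraps around (it compares s[-1] with s[0]) and keeps counting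
-- from the front of the string, while B returns the plain run length from position len(s)+i to
-- the end, the intended 'length of the consecutive run starting at index i'.
def D_retlen (s : String) (i : Int) : Prop :=
  i < 0 ∧ -(s.toList.length : Int) ≤ i ∧ s.toList ≠ [] ∧
  (s.toList.drop (s.toList.length - (-i).toNat)).all
    (fun ch => some ch == s.toList.getLast?) = true ∧
  s.toList.head? = s.toList.getLast?
instance (s : String) (i : Int) : Decidable (D_retlen s i) := by unfold D_retlen; infer_instance

def Spec_retlen (s : String) (i : Int) (out : Int) : Prop := ¬ D_retlen s i → out = retlen_alt s i
instance (s : String) (i : Int) (out : Int) : Decidable (Spec_retlen s i out) := by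
  unfold Spec_retlen; infer_instance

def pvDiffWitness_retlen : String × Int := ("aa", -1)
def pvDiffWitnessOut_retlen : Int × Int := (3, 1)

-- ===== CLAIM (what is proved, stated in full; the proofs are below) =====
def Claim_unchanged_retlen : Prop := ∀ (s : String) (i : Int), Dom_retlen s i → Pre_retlen s i → Spec_retlen s i (retlen s i)
def Claim_changed_retlen : Prop := Dom_retlen (pvDiffWitness_retlen.1) (pvDiffWitness_retlen.2) ∧ Pre_retlen (pvDiffWitness_retlen.1) (pvDiffWitness_retlen.2) ∧ D_retlen (pvDiffWitness_retlen.1) (pvDiffWitness_retlen.2) ∧ retlen (pvDiffWitness_retlen.1) (pvDiffWitness_retlen.2) = pvDiffWitnessOut_retlen.1 ∧ retlen_alt (pvDiffWitness_retlen.1) (pvDiffWitness_retlen.2) = pvDiffWitnessOut_retlen.2 ∧ pvDiffWitnessOut_retlen.1 ≠ pvDiffWitnessOut_retlen.2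
def Claim_exact_retlen : Prop := ∀ (s : String) (i : Int), Dom_retlen s i → Pre_retlen s i → D_retlen s i → retlen s i ≠ retlen_alt s i

-- ===== LEMMAS AND PROOFS =====
-- equation lemmas for the WF-recursive port A
theorem retlen_base (s : String) (i : Int) (h : i + 1 = PySem.Str.len s) : retlen s i = 1 := by
  rw [retlen, if_pos h]

theorem retlen_step (s : String) (i : Int) (a b : Char)
    (h : i + 1 ≠ PySem.Str.len s)
    (ha : PySem.Str.pyGet? s i = some a) (hb : PySem.Str.pyGet? s (i + 1) = some b) :
    retlen s i = if a = b then 1 + retlen s (i + 1) else 1 := by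
  rw [retlen, if_neg h]
  split
  · rename_i a' b' ha' hb'
    rw [ha] at ha'; rw [hb] at hb'
    cases ha'; cases hb'; rfl
  · rename_i hfall
    exact absurd (hfall a b ha hb) (fun x => x)

-- index-access facts
theorem pv_get_nat (s : String) (j : Nat) (hj : j < s.toList.length) :
    PySem.Str.pyGet? s (j : Int) = some (s.toList[j]'hj) := by
  simp [PySem.Str.pyGet?_natCast, List.getElem?_eq_getElem hj]

theorem pv_get_neg (s : String) (k : Nat) (h0 : 0 < k) (hk : k ≤ s.toList.length) :
    PySem.Str.pyGet? s (-(k : Int)) = some (s.toList[s.toList.length - k]'(by omega)) := by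
  have h := PySem.List.pyGet?_neg_natCast (xs := s.toList) (k := k) h0 hk
  rw [PySem.Str.pyGet?_eq, PySem.Chars.pyGet?_eq_listPyGet?, h,
    List.getElem?_eq_getElem (by omega)]

-- A on a nonnegative index is 1 + the run count of the tail
theorem pv_A_fwd (s : String) : ∀ (fuel j : Nat) (hj : j < s.toList.length),
    s.toList.length - j ≤ fuel →
    retlen s (j : Int) = 1 + pvRunCount (s.toList[j]'hj) (s.toList.drop (j + 1)) := by
  intro fuel
  induction fuel with
  | zero => intro j hj hf; omega
  | succ fuel ih =>
    intro j hj hf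
    have hL : PySem.Str.len s = (s.toList.length : Int) := PySem.Str.len_eq s
    by_cases hend : (j : Int) + 1 = PySem.Str.len s
    · have hj1 : j + 1 = s.toList.length := by rw [hL] at hend; omega
      rw [retlen_base s _ hend]
      rw [List.drop_eq_nil_of_le (by omega)]
      simp [pvRunCount]
    · have hj1 : j + 1 < s.toList.length := by
        rw [hL] at hend; omega
      have ha := pv_get_nat s j hj
      have hb' := pv_get_nat s (j + 1) hj1
      have hcast : ((j : Int) + 1) = ((j + 1 : Nat) : Int) := by push_cast; ring
      have hb : PySem.Str.pyGet? s ((j : Int) + 1) = some (s.toList[j + 1]'hj1) := by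
        rw [hcast]; exact hb'
      rw [retlen_step s _ _ _ hend ha hb]
      rw [List.drop_eq_getElem_cons hj1]
      by_cases heq : s.toList[j]'hj = s.toList[j + 1]'hj1
      · rw [if_pos heq]
        rw [hcast, ih (j + 1) hj1 (by omega)]
        simp [pvRunCount, heq]
      · rw [if_neg heq]
        have hne : ¬ s.toList[j + 1]'hj1 = s.toList[j]'hj := fun h => heq (Eq.symm h)
        simp [pvRunCount, hne]

-- B evaluated at a normalized index
theorem pv_B_eq (s : String) (i : Int) (p : Nat) (hp : p < s.toList.length)
    (hc : PySem.Str.pyGet? s i = some (s.toList[p]'hp))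
    (hm : PySem.Int.mod? i (PySem.Str.len s) = some ((p : Nat) : Int)) :
    retlen_alt s i = 1 + pvRunCount (s.toList[p]'hp) (s.toList.drop (p + 1)) := by
  unfold retlen_alt
  rw [hc]
  dsimp only
  rw [hm]
  dsimp only
  have hnat : ((p : Int) + 1).toNat = p + 1 := by omega
  rw [PySem.List.slice_from (xs := s.toList) (a := (p : Int) + 1) (by omega), hnat]

-- value of Python's  i % len(s)  on an in-range i
theorem pv_mod_inrange (s : String) (i : Int)
    (h1 : -(s.toList.length : Int) ≤ i) (h2 : i < (s.toList.length : Int)) :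
    PySem.Int.mod? i (PySem.Str.len s) =
      some (if 0 ≤ i then i else i + s.toList.length) := by
  have hL : 0 < (s.toList.length : Int) := by omega
  have hs0 : s ≠ "" := by
    intro h
    rw [h] at hL
    simp at hL
  have hmod : PySem.Int.mod? i (PySem.Str.len s) = some (PySem.Int.mod i (PySem.Str.len s)) := by
    simp [PySem.Int.mod?, PySem.Int.mod, hs0]
  rw [hmod, PySem.Str.len_eq, PySem.Int.mod_eq_emod_of_pos hL]
  congr 1
  by_cases h : 0 ≤ i
  · rw [if_pos h]
    exact Int.emod_eq_of_lt h h2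
  · rw [if_neg h]
    have e1 : (i + s.toList.length) % (s.toList.length : Int) = i % s.toList.length := by
      have := Int.add_mul_emod_self_left (a := i) (b := (s.toList.length : Int)) (c := 1)
      simpa using this
    rw [← e1]
    exact Int.emod_eq_of_lt (by omega) (by omega)

-- A on an in-range negative index, outside the wraparound region D_
theorem pv_A_neg (s : String) : ∀ (fuel : Nat) (i : Int)
    (h1 : -(s.toList.length : Int) ≤ i) (h2 : i < 0),
    (-i).toNat ≤ fuel → ¬ D_retlen s i →
    retlen s i = 1 + pvRunCount (s.toList[(i + s.toList.length).toNat]'(by omega))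
      (s.toList.drop ((i + s.toList.length).toNat + 1)) := by
  intro fuel
  induction fuel with
  | zero => intro i h1 h2 hf hD; omega
  | succ fuel ih =>
    intro i h1 h2 hf hD
    have hL0 : 0 < s.toList.length := by omega
    have htne : s.toList ≠ [] := by intro h; rw [h] at hL0; simp at hL0
    have hlen : PySem.Str.len s = (s.toList.length : Int) := PySem.Str.len_eq s
    have hend : i + 1 ≠ PySem.Str.len s := by rw [hlen]; omega
    have hlast : s.toList.getLast? = some (s.toList[s.toList.length - 1]'(by omega)) := by
      rw [List.getLast?_eq_getElem?, List.getElem?_eq_getElem (by omega)]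
    have hhead : s.toList.head? = some (s.toList[0]'hL0) := by
      rw [List.head?_eq_getElem?, List.getElem?_eq_getElem hL0]
    by_cases hi1 : i = -1
    · subst hi1
      have e : ((-1 : Int) + s.toList.length).toNat = s.toList.length - 1 := by omega
      simp only [e]
      have ha : PySem.Str.pyGet? s (-1) = some (s.toList[s.toList.length - 1]'(by omega)) := by
        have := pv_get_neg s 1 (by omega) (by omega)
        simpa using this
      have hb : PySem.Str.pyGet? s (-1 + 1) = some (s.toList[0]'hL0) := by
        have h0 : ((-1 : Int) + 1) = ((0 : Nat) : Int) := by norm_num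
        rw [h0, pv_get_nat s 0 hL0]
      have hne : ¬ (s.toList[s.toList.length - 1]'(by omega) = s.toList[0]'hL0) := by
        intro heq
        apply hD
        refine ⟨by norm_num, by omega, htne, ?_, ?_⟩
        · have e1 : ((-(-1 : Int)).toNat) = 1 := by norm_num
          rw [e1, List.drop_eq_getElem_cons (by omega : s.toList.length - 1 < s.toList.length),
            List.drop_eq_nil_of_le (by omega)]
          simp [hlast]
        · rw [hhead, hlast, heq]
      rw [retlen_step s (-1) _ _ hend ha hb, if_neg hne,
        List.drop_eq_nil_of_le (by omega)]
      simp [pvRunCount]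
    · have hi2 : i ≤ -2 := by omega
      have hk2 : 2 ≤ (-i).toNat := by omega
      have hkL : (-i).toNat ≤ s.toList.length := by omega
      have e : (i + (s.toList.length : Int)).toNat = s.toList.length - (-i).toNat := by omega
      simp only [e]
      have hik : i = -(((-i).toNat : Nat) : Int) := by omega
      have ha : PySem.Str.pyGet? s i
          = some (s.toList[s.toList.length - (-i).toNat]'(by omega)) := by
        have h := pv_get_neg s (-i).toNat (by omega) hkL
        rw [← hik] at h
        exact h
      have hik1 : i + 1 = -((((-i).toNat - 1 : Nat)) : Int) := by omega
      have hb : PySem.Str.pyGet? s (i + 1)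
          = some (s.toList[s.toList.length - ((-i).toNat - 1)]'(by omega)) := by
        have h := pv_get_neg s ((-i).toNat - 1) (by omega) (by omega)
        rw [← hik1] at h
        exact h
      have eidx : s.toList.length - ((-i).toNat - 1) = s.toList.length - (-i).toNat + 1 := by
        omega
      rw [retlen_step s i _ _ hend ha hb]
      by_cases heq : s.toList[s.toList.length - (-i).toNat]'(by omega)
          = s.toList[s.toList.length - ((-i).toNat - 1)]'(by omega)
      · rw [if_pos heq]
        have hD1 : ¬ D_retlen s (i + 1) := by
          intro hD1
          obtain ⟨_, _, _, hall1, hhl⟩ := hD1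
          apply hD
          refine ⟨by omega, by omega, htne, ?_, hhl⟩
          have e2 : ((-(i + 1)).toNat) = (-i).toNat - 1 := by omega
          rw [e2] at hall1
          rw [List.drop_eq_getElem_cons (by omega : s.toList.length - (-i).toNat < s.toList.length)]
          have e3 : s.toList.length - (-i).toNat + 1 = s.toList.length - ((-i).toNat - 1) := by
            omega
          rw [e3]
          rw [List.all_cons, hall1, Bool.and_true]
          -- head check: s.toList[L - k] == getLast?, via heq and hall1's own head
          have hlt : s.toList.length - ((-i).toNat - 1) < s.toList.length := by omega
          rw [List.drop_eq_getElem_cons hlt, List.all_cons] at hall1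
          have hhd := (Bool.and_eq_true _ _).mp hall1 |>.1
          simp only [beq_iff_eq] at hhd ⊢
          rw [heq]
          exact hhd
        have hrec := ih (i + 1) (by omega) (by omega) (by omega) hD1
        have e4 : (i + 1 + (s.toList.length : Int)).toNat = s.toList.length - (-i).toNat + 1 := by
          omega
        simp only [e4] at hrec
        rw [hrec]
        have hlt2 : s.toList.length - (-i).toNat + 1 < s.toList.length := by omega
        rw [List.drop_eq_getElem_cons hlt2]
        simp only [eidx] at heq
        simp only [pvRunCount]
        rw [if_pos heq.symm, heq]
      · rw [if_neg heq]
        have hlt2 : s.toList.length - (-i).toNat + 1 < s.toList.length := by omega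
        rw [List.drop_eq_getElem_cons hlt2]
        simp only [eidx] at heq
        simp only [pvRunCount]
        rw [if_neg (fun h => heq h.symm)]
        omega

-- A always returns at least 1
theorem pv_retlen_ge_one (s : String) : ∀ (fuel : Nat) (i : Int),
    (PySem.Str.len s + 1 - i).toNat ≤ fuel → 1 ≤ retlen s i := by
  intro fuel
  induction fuel with
  | zero =>
    intro i hf
    have hlen : PySem.Str.len s = (s.toList.length : Int) := PySem.Str.len_eq s
    have hend : i + 1 ≠ PySem.Str.len s := by omega
    have hnone : PySem.Str.pyGet? s i = none := by
      rw [PySem.Str.pyGet?_eq, PySem.Chars.pyGet?_eq_listPyGet?, PySem.List.pyGet?_eq_none_iff]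
      simp only [PySem.Raise.InRange]
      omega
    rw [retlen, if_neg hend]
    split
    · rename_i a b ha hb
      rw [hnone] at ha
      cases ha
    · norm_num
  | succ fuel ih =>
    intro i hf
    by_cases hend : i + 1 = PySem.Str.len s
    · rw [retlen_base s i hend]
    · rw [retlen, if_neg hend]
      split
      · rename_i a b ha hb
        split
        · have hlt := pv_get_lt s i a ha
          have := ih (i + 1) (by omega)
          omega
        · norm_num
      · norm_num

-- A inside the wraparound region: counts to the end and restarts at 0
theorem pv_A_inD (s : String) : ∀ (fuel : Nat) (i : Int)
    (h1 : -(s.toList.length : Int) ≤ i) (h2 : i < 0),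
    (-i).toNat ≤ fuel → D_retlen s i →
    retlen s i = -i + retlen s 0 := by
  intro fuel
  induction fuel with
  | zero => intro i h1 h2 hf hD; omega
  | succ fuel ih =>
    intro i h1 h2 hf hD
    obtain ⟨_, _, htne, hall, hhl⟩ := hD
    have hL0 : 0 < s.toList.length := by omega
    have hlen : PySem.Str.len s = (s.toList.length : Int) := PySem.Str.len_eq s
    have hend : i + 1 ≠ PySem.Str.len s := by rw [hlen]; omega
    have hlast : s.toList.getLast? = some (s.toList[s.toList.length - 1]'(by omega)) := by
      rw [List.getLast?_eq_getElem?, List.getElem?_eq_getElem (by omega)]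
    have hall' : ∀ ch ∈ s.toList.drop (s.toList.length - (-i).toNat),
        ch = s.toList[s.toList.length - 1]'(by omega) := by
      intro ch hch
      have := List.all_eq_true.mp hall ch hch
      rw [hlast] at this
      simpa using this
    by_cases hi1 : i = -1
    · subst hi1
      have ha : PySem.Str.pyGet? s (-1) = some (s.toList[s.toList.length - 1]'(by omega)) := by
        have := pv_get_neg s 1 (by omega) (by omega)
        simpa using this
      have hb : PySem.Str.pyGet? s (-1 + 1) = some (s.toList[0]'hL0) := by
        have h0 : ((-1 : Int) + 1) = ((0 : Nat) : Int) := by norm_num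
        rw [h0, pv_get_nat s 0 hL0]
      have heq : s.toList[s.toList.length - 1]'(by omega) = s.toList[0]'hL0 := by
        have hhead : s.toList.head? = some (s.toList[0]'hL0) := by
          rw [List.head?_eq_getElem?, List.getElem?_eq_getElem hL0]
        rw [hhead, hlast] at hhl
        exact (Option.some_inj.mp hhl).symm
      rw [retlen_step s (-1) _ _ hend ha hb, if_pos heq]
      norm_num
    · have hi2 : i ≤ -2 := by omega
      have hkL : (-i).toNat ≤ s.toList.length := by omega
      have ha : PySem.Str.pyGet? s i
          = some (s.toList[s.toList.length - (-i).toNat]'(by omega)) := by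
        have h := pv_get_neg s (-i).toNat (by omega) hkL
        have hik : i = -(((-i).toNat : Nat) : Int) := by omega
        rw [← hik] at h
        exact h
      have hb : PySem.Str.pyGet? s (i + 1)
          = some (s.toList[s.toList.length - ((-i).toNat - 1)]'(by omega)) := by
        have h := pv_get_neg s ((-i).toNat - 1) (by omega) (by omega)
        have hik1 : i + 1 = -((((-i).toNat - 1 : Nat)) : Int) := by omega
        rw [← hik1] at h
        exact h
      have hmem1 : s.toList[s.toList.length - (-i).toNat]'(by omega)
          ∈ s.toList.drop (s.toList.length - (-i).toNat) := by
        rw [List.drop_eq_getElem_cons (by omega : s.toList.length - (-i).toNat < s.toList.length)]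
        exact List.mem_cons_self
      have hmem2 : s.toList[s.toList.length - ((-i).toNat - 1)]'(by omega)
          ∈ s.toList.drop (s.toList.length - (-i).toNat) := by
        rw [List.drop_eq_getElem_cons (by omega : s.toList.length - (-i).toNat < s.toList.length)]
        apply List.mem_cons_of_mem
        have e3 : s.toList.length - (-i).toNat + 1 = s.toList.length - ((-i).toNat - 1) := by omega
        rw [e3, List.drop_eq_getElem_cons (by omega : s.toList.length - ((-i).toNat - 1) < s.toList.length)]
        exact List.mem_cons_self
      have heq : s.toList[s.toList.length - (-i).toNat]'(by omega)
          = s.toList[s.toList.length - ((-i).toNat - 1)]'(by omega) := by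
        rw [hall' _ hmem1, hall' _ hmem2]
      rw [retlen_step s i _ _ hend ha hb, if_pos heq]
      have hD1 : D_retlen s (i + 1) := by
        refine ⟨by omega, by omega, htne, ?_, hhl⟩
        have e2 : ((-(i + 1)).toNat) = (-i).toNat - 1 := by omega
        rw [e2]
        rw [List.all_eq_true]
        intro ch hch
        have hsub : ch ∈ s.toList.drop (s.toList.length - (-i).toNat) := by
          rw [List.drop_eq_getElem_cons (by omega : s.toList.length - (-i).toNat < s.toList.length)]
          apply List.mem_cons_of_mem
          have e3 : s.toList.length - (-i).toNat + 1 = s.toList.length - ((-i).toNat - 1) := by omega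
          rw [e3]
          exact hch
        have := List.all_eq_true.mp hall ch hsub
        exact this
      have hrec := ih (i + 1) (by omega) (by omega) (by omega) hD1
      rw [hrec]
      omega

-- the counting loop consumes a fully-equal list entirely
theorem pv_run_full (c : Char) : ∀ l : List Char, (∀ ch ∈ l, ch = c) →
    pvRunCount c l = (l.length : Int) := by
  intro l
  induction l with
  | nil => intro _; simp [pvRunCount]
  | cons x t iht =>
    intro h
    have hx : x = c := h x List.mem_cons_self
    simp only [pvRunCount, if_pos hx, iht (fun ch hch => h ch (List.mem_cons_of_mem x hch)),
      List.length_cons]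
    push_cast
    ring

-- B inside the wraparound region returns the plain run length -i
theorem pv_B_inD (s : String) (i : Int)
    (h1 : -(s.toList.length : Int) ≤ i) (h2 : i < 0) (hD : D_retlen s i) :
    retlen_alt s i = -i := by
  obtain ⟨_, _, htne, hall, hhl⟩ := hD
  have hL0 : 0 < s.toList.length := by omega
  have hp : (i + s.toList.length).toNat < s.toList.length := by omega
  have hm : PySem.Int.mod? i (PySem.Str.len s)
      = some (((i + s.toList.length).toNat : Nat) : Int) := by
    rw [pv_mod_inrange s i h1 (by omega), if_neg (by omega)]
    congr 1
    omega
  have hc : PySem.Str.pyGet? s i = some (s.toList[(i + s.toList.length).toNat]'hp) := by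
    have h := pv_get_neg s (-i).toNat (by omega) (by omega)
    have hik : i = -(((-i).toNat : Nat) : Int) := by omega
    rw [← hik] at h
    have e : s.toList.length - (-i).toNat = (i + s.toList.length).toNat := by omega
    simp only [e] at h
    exact h
  rw [pv_B_eq s i _ hp hc hm]
  have hlast : s.toList.getLast? = some (s.toList[s.toList.length - 1]'(by omega)) := by
    rw [List.getLast?_eq_getElem?, List.getElem?_eq_getElem (by omega)]
  have hall' : ∀ ch ∈ s.toList.drop (s.toList.length - (-i).toNat),
      ch = s.toList[s.toList.length - 1]'(by omega) := by
    intro ch hch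
    have := List.all_eq_true.mp hall ch hch
    rw [hlast] at this
    simpa using this
  have e : s.toList.length - (-i).toNat = (i + s.toList.length).toNat := by omega
  rw [e] at hall'
  have hhd : s.toList[(i + s.toList.length).toNat]'hp
      = s.toList[s.toList.length - 1]'(by omega) := by
    apply hall'
    rw [List.drop_eq_getElem_cons hp]
    exact List.mem_cons_self
  have hrun : pvRunCount (s.toList[(i + s.toList.length).toNat]'hp)
      (s.toList.drop ((i + s.toList.length).toNat + 1))
      = ((s.toList.drop ((i + s.toList.length).toNat + 1)).length : Int) := by
    rw [hhd]
    apply pv_run_full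
    intro ch hch
    apply hall'
    rw [List.drop_eq_getElem_cons hp]
    exact List.mem_cons_of_mem _ hch
  rw [hrun, List.length_drop]
  omega

-- main equivalence outside D_
theorem pv_main (s : String) (i : Int)
    (hpre : -(PySem.Str.len s) ≤ i ∧ i < PySem.Str.len s) (hD : ¬ D_retlen s i) :
    retlen s i = retlen_alt s i := by
  have hlen : PySem.Str.len s = (s.toList.length : Int) := PySem.Str.len_eq s
  rw [hlen] at hpre
  obtain ⟨h1, h2⟩ := hpre
  have hL0 : 0 < s.toList.length := by omega
  by_cases hneg : 0 ≤ i
  · have hp : i.toNat < s.toList.length := by omega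
    have hm : PySem.Int.mod? i (PySem.Str.len s) = some ((i.toNat : Nat) : Int) := by
      rw [pv_mod_inrange s i h1 h2, if_pos hneg]
      congr 1
      omega
    have hc : PySem.Str.pyGet? s i = some (s.toList[i.toNat]'hp) := by
      have h := pv_get_nat s i.toNat hp
      rw [show ((i.toNat : Nat) : Int) = i from by omega] at h
      exact h
    rw [pv_B_eq s i _ hp hc hm]
    have hA := pv_A_fwd s s.toList.length i.toNat hp (by omega)
    have hi : ((i.toNat : Nat) : Int) = i := by omega
    rw [hi] at hA
    exact hA
  · have hp : (i + s.toList.length).toNat < s.toList.length := by omega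
    have hm : PySem.Int.mod? i (PySem.Str.len s)
        = some (((i + s.toList.length).toNat : Nat) : Int) := by
      rw [pv_mod_inrange s i h1 h2, if_neg hneg]
      congr 1
      omega

    have hc : PySem.Str.pyGet? s i = some (s.toList[(i + s.toList.length).toNat]'hp) := by
      have h := pv_get_neg s (-i).toNat (by omega) (by omega)
      have hik : i = -(((-i).toNat : Nat) : Int) := by omega
      rw [← hik] at h
      have e : s.toList.length - (-i).toNat = (i + s.toList.length).toNat := by omega
      simp only [e] at h
      exact h
    rw [pv_B_eq s i _ hp hc hm]
    exact pv_A_neg s (-i).toNat i h1 (by omega) (le_refl _) hD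

-- witness values
theorem pv_wA : retlen "aa" (-1) = 3 := by
  have hend1 : ((-1 : Int) + 1) ≠ PySem.Str.len "aa" := by decide
  have ha1 : PySem.Str.pyGet? "aa" (-1) = some 'a' := by decide
  have hb1 : PySem.Str.pyGet? "aa" (-1 + 1) = some 'a' := by decide
  rw [retlen_step "aa" (-1) 'a' 'a' hend1 ha1 hb1, if_pos rfl]
  have hend2 : ((-1 : Int) + 1) + 1 ≠ PySem.Str.len "aa" := by decide
  have ha2 : PySem.Str.pyGet? "aa" (-1 + 1) = some 'a' := by decide
  have hb2 : PySem.Str.pyGet? "aa" (-1 + 1 + 1) = some 'a' := by decide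
  rw [retlen_step "aa" (-1 + 1) 'a' 'a' hend2 ha2 hb2, if_pos rfl]
  rw [retlen_base "aa" (-1 + 1 + 1) (by decide)]
  norm_num

theorem pv_wB : retlen_alt "aa" (-1) = 1 := by decide

-- ===== VERDICT (by name: the statements are the Claim_ definitions above) =====
theorem retlen_spec : Claim_unchanged_retlen := by
  intro s i _ hpre
  unfold Spec_retlen
  intro hD
  exact pv_main s i hpre hD

theorem retlen_changed : Claim_changed_retlen := by
  unfold Claim_changed_retlen
  exact ⟨by decide, by decide, by decide, pv_wA, pv_wB, by decide⟩

theorem retlen_tight : Claim_exact_retlen := by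
  intro s i _ _ hD
  have hA := pv_A_inD s (-i).toNat i hD.2.1 hD.1 (le_refl _) hD
  have hB := pv_B_inD s i hD.2.1 hD.1 hD
  have hone := pv_retlen_ge_one s (PySem.Str.len s + 1).toNat 0 (by omega)
  rw [hA, hB]
  omega
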